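-- pv_equiv track=rewrite | github.com/romeJG/python-backup | ACTIVITIES/Module 4/module4/problem32.py | lensort
-- ===== SOURCE A (Python) =====
-- def lensort(words):
--     num = []
--     new_content = []
--     ctr = 0
--     for x in words:
--         num.append(len(x))
--     num.sort()
--     while ctr < len(num):
--         in_ctr = 0
--         while in_ctr < len(words):
--             if(len(words[in_ctr]) == num[ctr]):
--                 if words[in_ctr] not in new_content:
--                     new_content.append(words[in_ctr])
--             in_ctr += 1
--         ctr += 1
--     return new_content
-- ===== SOURCE B (Python) =====
-- def lensort(words):
--     buckets = {}
--     for w in words: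
--         bucket = buckets.setdefault(len(w), [])
--         if w not in bucket:
--             bucket.append(w)
--     result = []
--     for length in sorted(buckets):
--         result.extend(buckets[length])
--     return result
-- ===== Notes on version B (the rewrite author's own statement) =====
-- stated objective: faster
-- what changed: Replaces A's sort-all-lengths-then-rescan-the-whole-word-list-once-per-length-entry strategy (with a global dedup list scanned on every append) by a single grouping pass into a length->bucket dict with per-bucket equality-based dedup, followed by concatenating the buckets over the sorted keys.
import Mathlib
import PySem

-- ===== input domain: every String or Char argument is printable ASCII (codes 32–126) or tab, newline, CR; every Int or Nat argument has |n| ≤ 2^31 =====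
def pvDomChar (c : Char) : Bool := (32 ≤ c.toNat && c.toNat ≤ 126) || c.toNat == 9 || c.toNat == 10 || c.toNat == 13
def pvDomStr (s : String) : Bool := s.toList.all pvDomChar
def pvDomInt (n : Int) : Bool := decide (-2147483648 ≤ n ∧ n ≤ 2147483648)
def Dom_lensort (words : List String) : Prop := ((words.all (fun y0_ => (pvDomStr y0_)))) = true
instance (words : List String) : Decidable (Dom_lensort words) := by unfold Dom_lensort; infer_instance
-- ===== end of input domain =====

-- ===== PORT A =====
-- B replaces A's sort-all-lengths-then-rescan-words-per-length strategy by one grouping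
-- pass into length buckets followed by a walk over the sorted bucket keys (objective: faster).
def lensort (words : List String) : List String :=
  let num := PySem.List.sorted (words.map (fun x => PySem.Str.len x)) (fun v => v) false
  num.foldl (fun new_content n =>
    words.foldl (fun nc w =>
      if PySem.Str.len w = n then
        (if nc.contains w then nc else nc ++ [w])
      else nc) new_content) []

-- ===== PORT B =====
def lensort_alt (words : List String) : List String :=
  let buckets : PySem.Dict Int (List String) :=
    words.foldl (fun d w =>
      d.modify (PySem.Str.len w) [] (fun b => if b.contains w then b else b ++ [w]))
      PySem.Dict.empty
  (PySem.List.sorted buckets.keys (fun v => v) false).foldl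
    (fun res k => res ++ buckets.getD k []) []

-- ===== PRECONDITION & SPEC =====
def Spec_lensort (words : List String) (out : List String) : Prop := out = lensort_alt words
instance (words : List String) (out : List String) : Decidable (Spec_lensort words out) := by unfold Spec_lensort; infer_instance

-- ===== CLAIM (what is proved, stated in full; the proofs are below) =====
def Claim_equal_lensort : Prop := ∀ (words : List String), Dom_lensort words → Spec_lensort words (lensort words)

-- ===== LEMMAS AND PROOFS =====

-- the distinct words of `words` of length L, first occurrences in order
def pvBkt (words : List String) (L : Int) : List String :=
  PySem.Set.ofList (words.filter (fun w => decide (PySem.Str.len w = L)))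

-- A's inner while-loop over `words` for one length value
def pvStepA (words : List String) (acc : List String) (L : Int) : List String :=
  words.foldl (fun nc w =>
    if PySem.Str.len w = L then
      (if nc.contains w then nc else nc ++ [w])
    else nc) acc

theorem pvDiscardEq (s : PySem.Set Int) (x : Int) :
    s.discard x = s.filter (fun y => !(y == x)) := rfl

theorem pvStepA_eq_filter_foldl (words : List String) (acc : List String) (L : Int) :
    pvStepA words acc L
      = (words.filter (fun w => decide (PySem.Str.len w = L))).foldl PySem.Set.add acc := by
  unfold pvStepA
  rw [PySem.List.foldl_ite_eq_foldl_filter (p := fun w => PySem.Str.len w = L)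
      (f := fun nc w => if nc.contains w then nc else nc ++ [w]) (init := acc)]
  rfl

theorem pvFoldlAdd_of_all_mem (l : List String) (s : List String)
    (h : ∀ x ∈ l, x ∈ s) : l.foldl PySem.Set.add s = s := by
  induction l with
  | nil => rfl
  | cons x t ih =>
    simp only [List.foldl_cons]
    rw [PySem.Set.add_of_mem (h x (List.mem_cons_self))]
    exact ih (fun y hy => h y (List.mem_cons_of_mem _ hy))

theorem pvStepA_noop (words : List String) (s : List String) (L : Int)
    (h : ∀ w ∈ words, PySem.Str.len w = L → w ∈ s) : pvStepA words s L = s := by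
  rw [pvStepA_eq_filter_foldl]
  apply pvFoldlAdd_of_all_mem
  intro x hx
  have hm := List.mem_filter.mp hx
  exact h x hm.1 (of_decide_eq_true hm.2)

theorem pvFoldlAdd_localize (acc : List String) (L : Int)
    (hacc : ∀ a ∈ acc, PySem.Str.len a ≠ L) :
    ∀ (l : List String) (s : List String), (∀ x ∈ l, PySem.Str.len x = L) →
    l.foldl PySem.Set.add (acc ++ s) = acc ++ l.foldl PySem.Set.add s := by
  intro l
  induction l with
  | nil => intro s _; rfl
  | cons x t ih =>
    intro s hl
    simp only [List.foldl_cons]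
    have hx : PySem.Str.len x = L := hl x (List.mem_cons_self)
    have hmem : x ∈ acc ++ s ↔ x ∈ s := by
      constructor
      · intro h
        rcases List.mem_append.mp h with h1 | h2
        · exact absurd hx (hacc x h1)
        · exact h2
      · exact fun h => List.mem_append.mpr (Or.inr h)
    have hstep : PySem.Set.add (acc ++ s) x = acc ++ PySem.Set.add s x := by
      rw [PySem.Set.add_eq_ite, PySem.Set.add_eq_ite]
      by_cases hxs : x ∈ s
      · rw [if_pos (hmem.mpr hxs), if_pos hxs]
      · rw [if_neg (fun h => hxs (hmem.mp h)), if_neg hxs, List.append_assoc]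
    rw [hstep]
    exact ih _ (fun y hy => hl y (List.mem_cons_of_mem _ hy))

theorem pvStepA_fresh (words : List String) (acc : List String) (L : Int)
    (hacc : ∀ a ∈ acc, PySem.Str.len a ≠ L) :
    pvStepA words acc L = acc ++ pvBkt words L := by
  rw [pvStepA_eq_filter_foldl]
  have h0 : acc = acc ++ ([] : List String) := by simp
  rw [h0]
  rw [pvFoldlAdd_localize acc L hacc _ []
      (fun x hx => of_decide_eq_true (List.mem_filter.mp hx).2)]
  simp only [List.append_nil]
  rfl

theorem pvBkt_len (words : List String) (L : Int) (a : String) (ha : a ∈ pvBkt words L) :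
    PySem.Str.len a = L := by
  unfold pvBkt at ha
  have := (PySem.Set.mem_ofList _ _).mp ha
  exact of_decide_eq_true (List.mem_filter.mp this).2

theorem pvBkt_mem (words : List String) (L : Int) (w : String) (hw : w ∈ words)
    (hl : PySem.Str.len w = L) : w ∈ pvBkt words L := by
  unfold pvBkt
  exact (PySem.Set.mem_ofList _ _).mpr (List.mem_filter.mpr ⟨hw, decide_eq_true hl⟩)

-- main invariant for A's outer loop: over any length list whose members are realized
-- lengths, starting from a length-saturated accumulator, the loop appends exactly the
-- buckets of the not-yet-seen lengths, in first-occurrence order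
theorem pvOuter (words : List String) (Ls : List Int) (acc : List String)
    (hreal : ∀ L ∈ Ls, ∃ w ∈ words, PySem.Str.len w = L)
    (hsat : ∀ a ∈ acc, ∀ w ∈ words, PySem.Str.len w = PySem.Str.len a → w ∈ acc) :
    Ls.foldl (pvStepA words) acc
      = acc ++ ((PySem.Set.ofList Ls).filter
          (fun L => decide (∀ a ∈ acc, PySem.Str.len a ≠ L))).flatMap (pvBkt words) := by
  induction Ls generalizing acc with
  | nil => simp [PySem.Set.ofList]
  | cons L Ls ih =>
    have hrealL : ∃ w ∈ words, PySem.Str.len w = L := hreal L (List.mem_cons_self)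
    have hreal' : ∀ L' ∈ Ls, ∃ w ∈ words, PySem.Str.len w = L' :=
      fun L' h => hreal L' (List.mem_cons_of_mem _ h)
    simp only [List.foldl_cons, PySem.Set.ofList_cons]
    by_cases hL : ∃ a ∈ acc, PySem.Str.len a = L
    · -- L already represented in acc: the pass over words is a no-op
      obtain ⟨a, haacc, halen⟩ := hL
      have hnoop : pvStepA words acc L = acc := by
        apply pvStepA_noop
        intro w hw hwl
        exact hsat a haacc w hw (by rw [hwl, halen])
      rw [hnoop, ih acc hreal' hsat]
      congr 1
      congr 1
      have hLfalse : (decide (∀ a ∈ acc, PySem.Str.len a ≠ L) : Bool) = false := by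
        simp only [decide_eq_false_iff_not]
        intro h; exact h a haacc halen
      rw [List.filter_cons_of_neg (by rw [hLfalse]; exact Bool.false_ne_true)]
      rw [pvDiscardEq, List.filter_filter]
      apply (List.filter_congr _).symm
      intro y _
      by_cases hyL : y = L
      · subst hyL
        simp only [hLfalse, Bool.false_and]
      · simp [hyL]
    · -- L is fresh in acc: the pass appends the L-bucket
      push Not at hL
      rw [pvStepA_fresh words acc L hL]
      obtain ⟨w0, hw0, hw0l⟩ := hrealL
      have hw0b : w0 ∈ pvBkt words L := pvBkt_mem words L w0 hw0 hw0l
      have hsat' : ∀ a ∈ acc ++ pvBkt words L, ∀ w ∈ words,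
          PySem.Str.len w = PySem.Str.len a → w ∈ acc ++ pvBkt words L := by
        intro a ha w hw hwl
        rcases List.mem_append.mp ha with h1 | h2
        · exact List.mem_append.mpr (Or.inl (hsat a h1 w hw hwl))
        · have hla : PySem.Str.len a = L := pvBkt_len words L a h2
          exact List.mem_append.mpr (Or.inr (pvBkt_mem words L w hw (by rw [hwl, hla])))
      rw [ih (acc ++ pvBkt words L) hreal' hsat']
      rw [List.append_assoc]
      congr 1
      have hLtrue : (decide (∀ a ∈ acc, PySem.Str.len a ≠ L) : Bool) = true :=
        decide_eq_true hL
      simp only [List.filter_cons, hLtrue]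
      rw [if_pos trivial, List.flatMap_cons]
      congr 1
      rw [pvDiscardEq, List.filter_filter]
      congr 1
      apply List.filter_congr
      intro y _
      by_cases hyL : y = L
      · subst hyL
        have h1 : (decide (∀ a ∈ acc ++ pvBkt words y, PySem.Str.len a ≠ y) : Bool) = false := by
          simp only [decide_eq_false_iff_not]
          intro h
          exact h w0 (List.mem_append.mpr (Or.inr hw0b)) hw0l
        rw [h1]
        simp
      · have h2 : (∀ a ∈ acc ++ pvBkt words L, PySem.Str.len a ≠ y)
            ↔ (∀ a ∈ acc, PySem.Str.len a ≠ y) := by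
          constructor
          · intro h a ha; exact h a (List.mem_append.mpr (Or.inl ha))
          · intro h a ha
            rcases List.mem_append.mp ha with h1 | h2'
            · exact h a h1
            · rw [pvBkt_len words L a h2']; exact fun hc => hyL hc.symm
        have hyb : (!(y == L)) = true := by simp [hyL]
        rw [hyb, Bool.and_true]
        exact decide_eq_decide.mpr h2

-- A computes the concatenation of the buckets over the sorted distinct lengths
theorem pvA_eq (words : List String) :
    lensort words
      = (PySem.Set.ofList
          (PySem.List.sorted (words.map (fun x => PySem.Str.len x)) (fun v => v) false)).flatMap
          (pvBkt words) := by
  unfold lensort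
  have h := pvOuter words
    (PySem.List.sorted (words.map (fun x => PySem.Str.len x)) (fun v => v) false) []
    (by
      intro L hL
      have hm : L ∈ words.map (fun x => PySem.Str.len x) :=
        (PySem.List.mem_sorted _ _ _ _).mp hL
      obtain ⟨w, hw, hwl⟩ := List.mem_map.mp hm
      exact ⟨w, hw, hwl⟩)
    (by intro a ha; simp at ha)
  simp only [List.nil_append] at h
  rw [show (fun (new_content : List String) (n : Int) =>
        words.foldl (fun nc w =>
          if PySem.Str.len w = n then
            (if nc.contains w then nc else nc ++ [w])
          else nc) new_content) = pvStepA words from rfl]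
  rw [h]
  congr 1
  apply List.filter_eq_self.mpr
  intro y _
  simp

-- Set.ofList is a sublist (first occurrences kept in place)
theorem pvOfListSublist (l : List Int) : (PySem.Set.ofList l).Sublist l := by
  induction l with
  | nil => simp [PySem.Set.ofList]
  | cons x t ih =>
    rw [PySem.Set.ofList_cons]
    apply List.Sublist.cons₂
    have h1 : ((PySem.Set.ofList t).discard x).Sublist (PySem.Set.ofList t) := by
      rw [pvDiscardEq]
      exact List.filter_sublist
    exact h1.trans ih

-- dedup of the sorted list = sorted of the dedup (the distinct values, increasing)
theorem pvSortedOfList (xs : List Int) :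
    PySem.List.sorted (PySem.Set.ofList xs) (fun v => v) false
      = PySem.Set.ofList (PySem.List.sorted xs (fun v => v) false) := by
  apply PySem.List.sorted_eq_of_perm_of_pairwise_lt
  · rw [List.perm_ext_iff_of_nodup (PySem.Set.nodup_ofList _) (PySem.Set.nodup_ofList _)]
    intro a
    rw [PySem.Set.mem_ofList, PySem.Set.mem_ofList, PySem.List.mem_sorted]
  · have hsub := pvOfListSublist (PySem.List.sorted xs (fun v => v) false)
    have hle : (PySem.Set.ofList (PySem.List.sorted xs (fun v => v) false)).Pairwise
        (fun a b => a ≤ b) :=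
      List.Pairwise.sublist hsub (PySem.List.sorted_pairwise xs (fun v => v))
    have hne : (PySem.Set.ofList (PySem.List.sorted xs (fun v => v) false)).Pairwise
        (fun a b => a ≠ b) := PySem.Set.nodup_ofList _
    exact (hle.and hne).imp (fun h => lt_of_le_of_ne h.1 h.2)

-- B's grouping loop: the list accumulated at key L is the length-L words, deduplicated
theorem pvBucketGetD (ws : List String) (d : PySem.Dict Int (List String)) (L : Int) :
    (ws.foldl (fun d w =>
        d.modify (PySem.Str.len w) [] (fun b => if b.contains w then b else b ++ [w])) d).getD L []
      = (ws.filter (fun w => decide (PySem.Str.len w = L))).foldl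
          (fun b w => if b.contains w then b else b ++ [w]) (d.getD L []) := by
  induction ws generalizing d with
  | nil => rfl
  | cons w t ih =>
    simp only [List.foldl_cons, List.filter_cons]
    rw [ih]
    by_cases hw : PySem.Str.len w = L
    · rw [decide_eq_true hw]
      simp only [if_true, List.foldl_cons]
      congr 1
      rw [PySem.Dict.getD_modify]
      rw [if_pos hw.symm, hw]
    · rw [decide_eq_false hw]
      simp only [Bool.false_eq_true, if_false]
      congr 1
      rw [PySem.Dict.getD_modify]
      rw [if_neg (fun h => hw h.symm)]

theorem pvB_eq (words : List String) :
    lensort_alt words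
      = (PySem.List.sorted (PySem.Set.ofList (words.map (fun x => PySem.Str.len x)))
          (fun v => v) false).flatMap (pvBkt words) := by
  unfold lensort_alt
  rw [PySem.List.foldl_append_eq_flatMap, List.nil_append]
  have hkeys : (words.foldl (fun d w =>
      d.modify (PySem.Str.len w) [] (fun b => if b.contains w then b else b ++ [w]))
      (PySem.Dict.empty : PySem.Dict Int (List String))).keys
      = PySem.Set.ofList (words.map (fun x => PySem.Str.len x)) := by
    rw [PySem.Dict.keys_foldl_modify_key words (fun w => PySem.Str.len w) []
        (fun _ w => fun b => if b.contains w then b else b ++ [w]) PySem.Dict.empty]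
    rfl
  have hfun : (fun k => (words.foldl (fun d w =>
      d.modify (PySem.Str.len w) [] (fun b => if b.contains w then b else b ++ [w]))
      (PySem.Dict.empty : PySem.Dict Int (List String))).getD k []) = pvBkt words := by
    funext L
    rw [pvBucketGetD, PySem.Dict.getD_empty]
    rfl
  rw [hkeys, hfun]

-- ===== VERDICT (by name: the statement is the Claim_ definition above) =====
theorem lensort_spec : Claim_equal_lensort := by
  intro words _
  unfold Spec_lensort
  rw [pvA_eq, pvB_eq, pvSortedOfList]
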